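-- pv_equiv track=rewrite | github.com/SocialFinanceDigitalLabs/AdventOfCode | solutions/2020/pughmds/day05/Day 5.py | findSoloSeat
-- ===== SOURCE A (Python) =====
-- def findSoloSeat(emptySeats):
--     '''
--         This should filter out any consecutively empty seats on the plane
--     '''
--     gaps = [[s, e] for s, e in zip(emptySeats, emptySeats[1:]) if s+1 < e]
--     edges = iter(emptySeats[:1] + sum(gaps, []) + emptySeats[-1:])
--     seatGroups = list(zip(edges, edges))
--     for group in seatGroups:
--         if group[0] == group[1]:
--             return group[1]
--     return 0
-- ===== SOURCE B (Python) =====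
-- def findSoloSeat(emptySeats):
--     '''
--         This should filter out any consecutively empty seats on the plane
--     '''
--     if not emptySeats:
--         return 0
--     start = emptySeats[0]
--     for i in range(len(emptySeats) - 1):
--         if emptySeats[i] + 1 < emptySeats[i + 1]:
--             if start == emptySeats[i]:
--                 return emptySeats[i]
--             start = emptySeats[i + 1]
--     if start == emptySeats[-1]:
--         return emptySeats[-1]
--     return 0
-- ===== Notes on version B (the rewrite author's own statement) =====
-- stated objective: faster
-- what changed: Replaced A's materialised gaps/edges/zip-pairing pipeline (whose sum-based list flattening is quadratic in the number of gaps) with a single streaming scan that carries the current run's start value and checks start==run end at each gap and at the final element.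
import Mathlib
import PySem

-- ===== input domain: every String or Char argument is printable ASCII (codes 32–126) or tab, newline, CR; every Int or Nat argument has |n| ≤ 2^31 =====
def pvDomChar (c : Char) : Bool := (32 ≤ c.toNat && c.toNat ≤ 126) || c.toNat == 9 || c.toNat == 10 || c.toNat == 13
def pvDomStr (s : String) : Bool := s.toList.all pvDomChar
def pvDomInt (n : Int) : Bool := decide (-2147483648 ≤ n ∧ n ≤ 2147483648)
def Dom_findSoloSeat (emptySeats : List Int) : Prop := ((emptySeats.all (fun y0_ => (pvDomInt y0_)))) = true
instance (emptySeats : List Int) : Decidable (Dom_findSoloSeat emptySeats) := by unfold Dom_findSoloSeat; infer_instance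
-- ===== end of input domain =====

-- B replaces A's gaps/edges/zip-pairing pipeline with one streaming scan carrying
-- the current run's start value (objective: faster; avoids the quadratic sum-based flattening).

-- ===== PORT A =====
-- zip(edges, edges) over one iterator pairs consecutive elements, dropping a trailing odd one
def pairUpA : List Int → List (Int × Int)
  | a :: b :: rest => (a, b) :: pairUpA rest
  | _ => []

-- 'for group in seatGroups: if group[0] == group[1]: return group[1]; return 0'
def loopA : List (Int × Int) → Int
  | [] => 0
  | (a, b) :: rest => if a = b then b else loopA rest

def findSoloSeat (emptySeats : List Int) : Int :=
  let gaps := (emptySeats.zip (PySem.List.slice emptySeats (some 1) none)).filter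
      (fun p => decide (p.1 + 1 < p.2))
  let edges := PySem.List.slice emptySeats none (some 1)
      ++ gaps.flatMap (fun p => [p.1, p.2])
      ++ PySem.List.slice emptySeats (some (-1)) none
  let seatGroups := pairUpA edges
  loopA seatGroups

-- ===== PORT B =====
-- the loop: prev is emptySeats[i], rest the elements after it, start the current run's start
def scanB (start prev : Int) : List Int → Int
  | [] => if start = prev then prev else 0
  | next :: rest =>
      if prev + 1 < next then
        if start = prev then prev else scanB next next rest
      else
        scanB start next rest

def findSoloSeat_alt (emptySeats : List Int) : Int :=
  match emptySeats with
  | [] => 0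
  | x :: rest => scanB x x rest

-- ===== PRECONDITION & SPEC =====
def Spec_findSoloSeat (emptySeats : List Int) (out : Int) : Prop := out = findSoloSeat_alt emptySeats
instance (emptySeats : List Int) (out : Int) : Decidable (Spec_findSoloSeat emptySeats out) := by unfold Spec_findSoloSeat; infer_instance

-- ===== CLAIM (what is proved, stated in full; the proofs are below) =====
def Claim_equal_findSoloSeat : Prop := ∀ (emptySeats : List Int), Dom_findSoloSeat emptySeats → Spec_findSoloSeat emptySeats (findSoloSeat emptySeats)

-- ===== LEMMAS AND PROOFS =====

-- the flattened gap list of prev :: rest, in recursive form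
def flatGaps (prev : Int) : List Int → List Int
  | [] => []
  | next :: rest => (if prev + 1 < next then [prev, next] else []) ++ flatGaps next rest

theorem flatGaps_eq (prev : Int) (rest : List Int) :
    (((prev :: rest).zip rest).filter (fun p => decide (p.1 + 1 < p.2))).flatMap
      (fun p => [p.1, p.2]) = flatGaps prev rest := by
  induction rest generalizing prev with
  | nil => rfl
  | cons next rest ih =>
      simp only [List.zip_cons_cons, List.filter_cons, flatGaps, ← ih next]
      by_cases h : prev + 1 < next <;> simp [h]

theorem core (rest : List Int) : ∀ start prev : Int,
    loopA (pairUpA (start :: (flatGaps prev rest ++ [(prev :: rest).getLast (by simp)]))) =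
      scanB start prev rest := by
  induction rest with
  | nil => intro start prev; simp [flatGaps, pairUpA, loopA, scanB]
  | cons next rest ih =>
      intro start prev
      have hlast : (prev :: next :: rest).getLast (by simp) =
          (next :: rest).getLast (by simp) := by
        simp [List.getLast_cons]
      rw [hlast]
      by_cases h : prev + 1 < next
      · simp only [flatGaps, if_pos h, List.cons_append, List.nil_append,
          pairUpA, loopA, scanB]
        by_cases hs : start = prev
        · simp [hs]
        · simp [hs, ih next next]
      · simp only [flatGaps, if_neg h, List.nil_append, scanB]
        exact ih start next

theorem drop_pred_eq_getLast (l : List Int) (h : l ≠ []) :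
    l.drop (l.length - 1) = [l.getLast h] := by
  induction l with
  | nil => exact absurd rfl h
  | cons x rest ih =>
      cases rest with
      | nil => rfl
      | cons y ys =>
          simp only [List.length_cons, Nat.add_sub_cancel]
          simpa using ih (by simp)

theorem edges_cons (x : Int) (rest : List Int) :
    findSoloSeat (x :: rest) =
      loopA (pairUpA (x :: (flatGaps x rest ++ [(x :: rest).getLast (by simp)]))) := by
  have h1 : PySem.List.slice (x :: rest) (some 1) none = rest :=
    PySem.List.slice_from_one (x :: rest)
  have h2 : PySem.List.slice (x :: rest) none (some 1) = [x] := by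
    rw [show ((some 1 : Option Int)) = some ((1 : Nat) : Int) by norm_num,
      PySem.List.slice_to_natCast]
    rfl
  have h3 : PySem.List.slice (x :: rest) (some (-1)) none =
      [(x :: rest).getLast (by simp)] := by
    rw [PySem.List.slice_from_neg_one]
    exact drop_pred_eq_getLast (x :: rest) (by simp)
  simp only [findSoloSeat, h1, h2, h3, flatGaps_eq]
  simp

-- ===== VERDICT (by name: the statement is the Claim_ definition above) =====
theorem findSoloSeat_spec : Claim_equal_findSoloSeat := by
  intro emptySeats _
  unfold Spec_findSoloSeat
  cases emptySeats with
  | nil => rfl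
  | cons x rest => rw [edges_cons, core, findSoloSeat_alt]
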